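-- pv_equiv track=rewrite | github.com/aa694849243/leetcode_cj | 1938. 查询最大基因差.py | maxGeneticDifference
-- ===== SOURCE A (Python) =====
-- from typing import List
-- import collections
--
-- class BitTrie:
--     L = 17
--
--     def __init__(self):
--         self.cnt = 0
--         self.left = None
--         self.right = None
--
--     def insert_node(self, val):
--         node = self
--         for off in range(BitTrie.L, -1, -1):
--             node.cnt += 1
--             if val & (1 << off):
--                 if not node.right:
--                     node.right = BitTrie()
--                 node = node.right
--             else:
--                 if not node.left:
--                     node.left = BitTrie()
--                 node = node.left
--         node.cnt += 1
--
--     def del_node(self, val):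
--         node = self
--         for off in range(BitTrie.L, -1, -1):
--             node.cnt -= 1
--             if val & (1 << off):
--                 node = node.right
--             else:
--                 node = node.left
--         node.cnt-=1
--
--     def get_max_xor(self, val):
--         node = self
--         ans = 0
--         for off in range(BitTrie.L, -1, -1):
--             if val & (1 << off):
--                 if node.left and node.left.cnt > 0:
--                     node = node.left
--                     ans |= (1 << off)
--                 else:
--                     node = node.right
--             else:
--                 if node.right and node.right.cnt > 0:
--                     node = node.right
--                     ans |= (1 << off)
--                 else:
--                     node = node.left
--         return ans
--
-- def maxGeneticDifference(parents: List[int], queries: List[List[int]]) -> List[int]: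
--     edges = collections.defaultdict(list)
--     for i, parents in enumerate(parents):
--         if parents != -1:
--             edges[parents].append(i)
--         else:
--             root = i
--     ans = [0] * len(queries)
--     stored = collections.defaultdict(list)
--     for i, (node, val) in enumerate(queries):
--         stored[node].append((i, val))
--     trie=BitTrie()
--     def dfs(node):
--         trie.insert_node(node)
--         for i, val in stored[node]:
--             ans[i] = trie.get_max_xor(val)
--         for child in edges[node]:
--             dfs(child)
--         trie.del_node(node)
--     dfs(root)
--     return ans
-- ===== SOURCE B (Python) =====
-- from typing import List
-- import collections
--
-- def maxGeneticDifference(parents: List[int], queries: List[List[int]]) -> List[int]: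
--     MASK = (1 << 18) - 1
--     children = collections.defaultdict(list)
--     root = -1
--     for i, p in enumerate(parents):
--         if p != -1:
--             children[p].append(i)
--         else:
--             root = i
--     byNode = collections.defaultdict(list)
--     for i, q in enumerate(queries):
--         byNode[q[0]].append((i, q[1]))
--     ans = [0] * len(queries)
--     path = []
--     def dfs(node):
--         path.append(node)
--         for i, val in byNode[node]:
--             ans[i] = max((val ^ a) & MASK for a in path)
--         for c in children[node]:
--             dfs(c)
--         path.pop()
--     dfs(root)
--     return ans
-- ===== Notes on version B (the rewrite author's own statement) =====
-- stated objective: simpler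
-- what changed: B drops the bit trie entirely: it keeps the current root-to-node path as a plain list during the same DFS and answers each query by a linear max of (val ^ ancestor) & MASK over that path.
import Mathlib
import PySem

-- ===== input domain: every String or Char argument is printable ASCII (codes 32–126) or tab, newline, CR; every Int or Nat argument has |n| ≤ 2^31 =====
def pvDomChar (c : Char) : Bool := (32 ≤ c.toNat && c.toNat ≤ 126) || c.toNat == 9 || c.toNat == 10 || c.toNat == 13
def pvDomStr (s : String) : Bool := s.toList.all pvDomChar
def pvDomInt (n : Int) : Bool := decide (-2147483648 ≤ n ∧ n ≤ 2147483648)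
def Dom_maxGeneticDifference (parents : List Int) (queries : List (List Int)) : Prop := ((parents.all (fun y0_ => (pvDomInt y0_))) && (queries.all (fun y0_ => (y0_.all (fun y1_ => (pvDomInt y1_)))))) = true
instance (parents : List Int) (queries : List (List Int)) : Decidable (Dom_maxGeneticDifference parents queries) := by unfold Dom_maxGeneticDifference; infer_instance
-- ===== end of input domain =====

-- B replaces A's bit trie (insert/delete/greedy-descend) by the current root-to-node path kept as a
-- plain list, answering each query by a linear max of (val ^ a) & MASK over the path — simpler, no
-- speed claim.  Equality of return values is proved on Pre_ (A raises NameError when parents has no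
-- -1 and ValueError when a query is not a pair).  A mutates nothing observable; neither does B.

-- ===== PORT A =====
-- BitTrie: left/right = None is the .nil constructor; cnt of a missing node reads as 0.
inductive BTrie
  | nil : BTrie
  | node : Int → BTrie → BTrie → BTrie

def tcnt : BTrie → Int
  | .nil => 0
  | .node c _ _ => c

def tleft : BTrie → BTrie
  | .nil => .nil
  | .node _ l _ => l

def tright : BTrie → BTrie
  | .nil => .nil
  | .node _ _ r => r

def tIsNil : BTrie → Bool
  | .nil => true
  | .node _ _ _ => false

-- Python truthiness of `val & (1 << off)`: the bit test used by all three trie loops.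
def bitOn (v : Int) (off : Nat) : Bool := PySem.Int.band v ((1 : Int) <<< off) != 0

-- `for off in range(BitTrie.L, -1, -1)` ported as recursion on the number of remaining levels
-- (ℓ = off + 1; ℓ = 0 is the leaf `node.cnt += 1` after the loop).  Descending into a None child
-- is Python's `node.right = BitTrie()` then descend: recursing on .nil is exactly that.
def trieInsert : BTrie → Int → Nat → BTrie
  | t, _, 0 => .node (tcnt t + 1) (tleft t) (tright t)
  | t, v, ℓ + 1 =>
    if bitOn v ℓ then .node (tcnt t + 1) (tleft t) (trieInsert (tright t) v ℓ)
    else .node (tcnt t + 1) (trieInsert (tleft t) v ℓ) (tright t)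

-- del_node: Python would crash on a None child; the algorithm only deletes previously inserted
-- values, so that path never runs (recursing on .nil keeps the port total).
def trieDel : BTrie → Int → Nat → BTrie
  | t, _, 0 => .node (tcnt t - 1) (tleft t) (tright t)
  | t, v, ℓ + 1 =>
    if bitOn v ℓ then .node (tcnt t - 1) (tleft t) (trieDel (tright t) v ℓ)
    else .node (tcnt t - 1) (trieDel (tleft t) v ℓ) (tright t)

-- get_max_xor with the `ans |=` accumulator threaded through the loop.
def trieGetMax : BTrie → Int → Nat → Int → Int
  | _, _, 0, acc => acc
  | t, v, ℓ + 1, acc =>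
    if bitOn v ℓ then
      if !(tIsNil (tleft t)) && decide (0 < tcnt (tleft t)) then
        trieGetMax (tleft t) v ℓ (PySem.Int.bor acc ((1 : Int) <<< ℓ))
      else trieGetMax (tright t) v ℓ acc
    else
      if !(tIsNil (tright t)) && decide (0 < tcnt (tright t)) then
        trieGetMax (tright t) v ℓ (PySem.Int.bor acc ((1 : Int) <<< ℓ))
      else trieGetMax (tleft t) v ℓ acc

-- dfs: state = (trie, ans); answer the node's stored queries right after inserting it, then the
-- children, then delete.  Fuel bounds the recursion depth; the caller passes parents.length + 1,
-- which exceeds the depth of any tree reachable from the root (distinct in-range indices).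
def dfsA (edges : PySem.Dict Int (List Int)) (stored : PySem.Dict Int (List (Int × Int))) :
    Nat → Int → BTrie × List Int → BTrie × List Int
  | 0, _, s => s
  | f + 1, nd, s =>
    let t1 := trieInsert s.1 nd 18
    let ans1 := (stored.getD nd []).foldl
      (fun a q => a.set q.1.toNat (trieGetMax t1 q.2 18 0)) s.2
    let s2 := (edges.getD nd []).foldl (fun st c => dfsA edges stored f c st) (t1, ans1)
    (trieDel s2.1 nd 18, s2.2)

-- `for i, (node, val) in enumerate(queries)`: one step of the stored-bucket loop (pairs only;
-- a query of any other length raises ValueError in Python and is excluded by Pre_).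
def qStoreA (d : PySem.Dict Int (List (Int × Int))) (iq : Int × List Int) :
    PySem.Dict Int (List (Int × Int)) :=
  match iq.2 with
  | [nd, v] => d.insert nd (d.getD nd [] ++ [(iq.1, v)])
  | _ => d

def maxGeneticDifference (parents : List Int) (queries : List (List Int)) : List Int :=
  let er := (PySem.List.enumerate parents 0).foldl
    (fun (s : PySem.Dict Int (List Int) × Int) ip =>
      if ip.2 != -1 then (s.1.insert ip.2 (s.1.getD ip.2 [] ++ [ip.1]), s.2) else (s.1, ip.1))
    (PySem.Dict.empty, -1)  -- root is unbound in Python until a -1 is seen (Pre_ guarantees one)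
  let stored := (PySem.List.enumerate queries 0).foldl qStoreA PySem.Dict.empty
  (dfsA er.1 stored (parents.length + 1) er.2
    (BTrie.node 0 BTrie.nil BTrie.nil, List.replicate queries.length 0)).2

-- ===== PORT B =====
def maskB : Int := ((1 : Int) <<< 18) - 1

-- dfs: state = (path, ans); the trie is replaced by the current root-to-node path, a query is a
-- linear max of (val ^ a) & MASK over the path (nonempty: the node itself was just appended, so
-- the .getD 0 default of Python's max(...) is never used).  Same fuel convention as dfsA.
def dfsB (children : PySem.Dict Int (List Int)) (byNode : PySem.Dict Int (List (Int × Int))) :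
    Nat → Int → List Int × List Int → List Int × List Int
  | 0, _, s => s
  | f + 1, nd, s =>
    let p1 := s.1 ++ [nd]
    let ans1 := (byNode.getD nd []).foldl
      (fun a q => a.set q.1.toNat
        ((PySem.List.max? (p1.map (fun x => PySem.Int.band (PySem.Int.bxor q.2 x) maskB))
          (fun y => y)).getD 0)) s.2
    let s2 := (children.getD nd []).foldl (fun st c => dfsB children byNode f c st) (p1, ans1)
    (s2.1.dropLast, s2.2)  -- path.pop() on the nonempty path

-- byNode bucket step: B reads q[0], q[1], so any query with at least two entries is accepted.
def qStoreB (d : PySem.Dict Int (List (Int × Int))) (iq : Int × List Int) :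
    PySem.Dict Int (List (Int × Int)) :=
  match iq.2 with
  | nd :: v :: _ => d.insert nd (d.getD nd [] ++ [(iq.1, v)])
  | _ => d

def maxGeneticDifference_alt (parents : List Int) (queries : List (List Int)) : List Int :=
  let cr := (PySem.List.enumerate parents 0).foldl
    (fun (s : PySem.Dict Int (List Int) × Int) ip =>
      if ip.2 != -1 then (s.1.insert ip.2 (s.1.getD ip.2 [] ++ [ip.1]), s.2) else (s.1, ip.1))
    (PySem.Dict.empty, -1)
  let byNode := (PySem.List.enumerate queries 0).foldl qStoreB PySem.Dict.empty
  (dfsB cr.1 byNode (parents.length + 1) cr.2 ([], List.replicate queries.length 0)).2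

-- ===== PRECONDITION & SPEC =====
-- Pre_ excludes exactly the inputs where A raises: no -1 in parents (root stays unbound,
-- NameError) or a query that is not a 2-element list (unpacking raises ValueError).
def Pre_maxGeneticDifference (parents : List Int) (queries : List (List Int)) : Prop :=
  (-1 : Int) ∈ parents ∧ ∀ q ∈ queries, q.length = 2

instance (parents : List Int) (queries : List (List Int)) :
    Decidable (Pre_maxGeneticDifference parents queries) := by
  unfold Pre_maxGeneticDifference; infer_instance

def pvWitness_maxGeneticDifference : List Int × List (List Int) := ([-1, 0], [[1, 3], [0, 2]])

def Spec_maxGeneticDifference (parents : List Int) (queries : List (List Int)) (out : List Int) : Prop := out = maxGeneticDifference_alt parents queries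
instance (parents : List Int) (queries : List (List Int)) (out : List Int) : Decidable (Spec_maxGeneticDifference parents queries out) := by unfold Spec_maxGeneticDifference; infer_instance

-- ===== CLAIM (what is proved, stated in full; the proofs are below) =====
def Claim_equal_maxGeneticDifference : Prop := ∀ (parents : List Int) (queries : List (List Int)), Dom_maxGeneticDifference parents queries → Pre_maxGeneticDifference parents queries → Spec_maxGeneticDifference parents queries (maxGeneticDifference parents queries)

-- ===== LEMMAS AND PROOFS =====

-- Sign-split view of Python's bit test (infinite two's complement).
def ibit (ℓ : Nat) (a : Int) : Bool :=
  if 0 ≤ a then a.toNat.testBit ℓ else !(((-a) - 1).toNat.testBit ℓ)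

lemma one_shl (ℓ : Nat) : ((1 : Int) <<< ℓ) = ((2 ^ ℓ : Nat) : Int) := by
  simp [Int.shiftLeft_eq]

lemma bitOn_eq (v : Int) (ℓ : Nat) : bitOn v ℓ = ibit ℓ v := by
  unfold bitOn ibit
  rw [one_shl]
  by_cases hv : 0 ≤ v
  · rw [PySem.Int.band_of_nonneg hv (by positivity)]
    simp only [Int.toNat_natCast, Nat.and_two_pow, hv, if_true]
    have hp : 0 < 2 ^ ℓ := by positivity
    cases h : v.toNat.testBit ℓ <;> simp [h] <;> omega
  · have hv' : ¬ (0 ≤ v) := hv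
    rw [PySem.Int.band]
    simp only [hv', if_false, if_true, show (0:Int) ≤ ((2^ℓ:Nat):Int) from by positivity]
    rw [Int.toNat_natCast, Nat.land_comm]
    rw [Nat.and_two_pow]
    set m := (-v - 1).toNat
    have hp : 2 ^ ℓ > 0 := by positivity
    cases h : m.testBit ℓ <;> simp [h] <;> omega

lemma emod_two_pow_neg (m k : Nat) :
    ((-(↑m + 1) : Int) % (2 : Int) ^ k) = ((2 ^ k : Nat) : Int) - 1 - ((m % 2 ^ k : Nat) : Int) := by
  have hd : m = 2 ^ k * (m / 2 ^ k) + m % 2 ^ k := (Nat.div_add_mod m (2 ^ k)).symm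
  have hr : m % 2 ^ k < 2 ^ k := Nat.mod_lt _ (by positivity)
  have h1 : (-(↑m + 1) : Int) =
      (((2 ^ k : Nat) : Int) - 1 - ((m % 2 ^ k : Nat) : Int)) + (2 : Int) ^ k * (-(↑(m / 2 ^ k)) - 1) := by
    push_cast
    nth_rewrite 1 [hd]
    push_cast
    ring
  rw [h1, Int.add_mul_emod_self_left, Int.emod_eq_of_lt (by push_cast; omega) (by push_cast; omega)]

lemma band_mask (x : Int) (ℓ : Nat) :
    PySem.Int.band x ((2 : Int) ^ ℓ - 1) = x % (2 : Int) ^ ℓ := by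
  have hmask : ((2 : Int) ^ ℓ - 1) = ((2 ^ ℓ - 1 : Nat) : Int) := by
    have : (1:Nat) ≤ 2 ^ ℓ := Nat.one_le_two_pow
    push_cast [this]; ring
  by_cases hx : 0 ≤ x
  · obtain ⟨n, rfl⟩ := Int.eq_ofNat_of_zero_le hx
    rw [hmask, PySem.Int.band_of_nonneg (by positivity) (by positivity)]
    rw [Int.toNat_natCast, Int.toNat_natCast, Nat.and_two_pow_sub_one_eq_mod]
    push_cast
    rfl
  · set m := (-x - 1).toNat with hm
    have hxm : x = -(↑m + 1) := by omega
    have h1 : (1:Nat) ≤ 2 ^ ℓ := Nat.one_le_two_pow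
    have hr : m % 2 ^ ℓ < 2 ^ ℓ := Nat.mod_lt _ (by positivity)
    rw [hxm, emod_two_pow_neg]
    rw [PySem.Int.band]
    have hnx : ¬ (0 ≤ (-(↑m + 1) : Int)) := by omega
    simp only [hnx, if_false, show (0:Int) ≤ (2:Int)^ℓ - 1 from by omega, if_true]
    have h2 : (-(-(↑m + 1 : Int)) - 1).toNat = m := by omega
    rw [h2, hmask, Int.toNat_natCast, Nat.land_comm, Nat.and_two_pow_sub_one_eq_mod]
    omega

lemma band_mask_bounds (x : Int) (ℓ : Nat) :
    0 ≤ PySem.Int.band x ((2 : Int) ^ ℓ - 1) ∧ PySem.Int.band x ((2 : Int) ^ ℓ - 1) < 2 ^ ℓ := by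
  rw [band_mask]
  constructor
  · exact Int.emod_nonneg x (by positivity)
  · exact Int.emod_lt_of_pos x (by positivity)

lemma ibit_bxor (ℓ : Nat) (v a : Int) :
    ibit ℓ (PySem.Int.bxor v a) = xor (ibit ℓ v) (ibit ℓ a) := by
  unfold ibit
  rw [PySem.Int.bxor]
  by_cases hv : 0 ≤ v <;> by_cases ha : 0 ≤ a <;>
    simp only [hv, ha, if_true, if_false]
  · rw [if_pos (by positivity), Int.toNat_natCast, Nat.testBit_xor]
  · rw [if_neg (by omega),
      show (-(-(↑(v.toNat ^^^ (-a - 1).toNat) : Int) - 1) - 1).toNat = v.toNat ^^^ (-a - 1).toNat from by omega,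
      Nat.testBit_xor]
    cases v.toNat.testBit ℓ <;> cases ((-a - 1).toNat).testBit ℓ <;> rfl
  · rw [if_neg (by omega),
      show (-(-(↑((-v - 1).toNat ^^^ a.toNat) : Int) - 1) - 1).toNat = (-v - 1).toNat ^^^ a.toNat from by omega,
      Nat.testBit_xor]
    cases ((-v - 1).toNat).testBit ℓ <;> cases a.toNat.testBit ℓ <;> rfl
  · rw [if_pos (by positivity), Int.toNat_natCast, Nat.testBit_xor]
    cases ((-v - 1).toNat).testBit ℓ <;> cases ((-a - 1).toNat).testBit ℓ <;> rfl

lemma emod_decomp (x : Int) (ℓ : Nat) :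
    x % (2 : Int) ^ (ℓ + 1) = (if ibit ℓ x then (2 : Int) ^ ℓ else 0) + x % (2 : Int) ^ ℓ := by
  unfold ibit
  by_cases hx : 0 ≤ x
  · obtain ⟨n, rfl⟩ := Int.eq_ofNat_of_zero_le hx
    simp only [hx, if_true, Int.toNat_natCast]
    have hd : n % 2 ^ (ℓ + 1) = n % 2 ^ ℓ + 2 ^ ℓ * (n / 2 ^ ℓ % 2) := Nat.mod_pow_succ
    have ht : n.testBit ℓ = decide (n / 2 ^ ℓ % 2 = 1) := Nat.testBit_eq_decide_div_mod_eq
    have hm2 : n / 2 ^ ℓ % 2 < 2 := Nat.mod_lt _ (by norm_num)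
    have c1 : ((n:Int)) % (2:Int) ^ (ℓ+1) = ((n % 2 ^ (ℓ+1) : Nat) : Int) := by push_cast; rfl
    have c2 : ((n:Int)) % (2:Int) ^ ℓ = ((n % 2 ^ ℓ : Nat) : Int) := by push_cast; rfl
    have hp2 : (2:Int) ^ ℓ = ((2 ^ ℓ : Nat) : Int) := by push_cast; rfl
    rw [c1, c2, ht, hp2]
    by_cases hb : n / 2 ^ ℓ % 2 = 1
    · rw [hb] at hd
      simp only [hb, decide_true, if_true]
      omega
    · have hb0 : n / 2 ^ ℓ % 2 = 0 := by omega
      rw [hb0] at hd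
      rw [if_neg (by simp [hb])]
      omega
  · set m := (-x - 1).toNat with hm
    have hxm : x = -(↑m + 1) := by omega
    simp only [hx, if_false]
    have hd : m % 2 ^ (ℓ + 1) = m % 2 ^ ℓ + 2 ^ ℓ * (m / 2 ^ ℓ % 2) := Nat.mod_pow_succ
    have ht : m.testBit ℓ = decide (m / 2 ^ ℓ % 2 = 1) := Nat.testBit_eq_decide_div_mod_eq
    have hm2 : m / 2 ^ ℓ % 2 < 2 := Nat.mod_lt _ (by norm_num)
    have hr : m % 2 ^ ℓ < 2 ^ ℓ := Nat.mod_lt _ (by positivity)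
    have hr1 : m % 2 ^ (ℓ+1) < 2 ^ (ℓ+1) := Nat.mod_lt _ (by positivity)
    rw [hxm, emod_two_pow_neg, emod_two_pow_neg, ht]
    have hp : (2:Int) ^ (ℓ+1) = ((2 ^ (ℓ+1) : Nat) : Int) := by push_cast; rfl
    have hp2 : (2:Int) ^ ℓ = ((2 ^ ℓ : Nat) : Int) := by push_cast; rfl
    rw [hp2]
    by_cases hb : m / 2 ^ ℓ % 2 = 1
    · rw [hb] at hd
      rw [if_neg (by simp [hb])]
      omega
    · have hb0 : m / 2 ^ ℓ % 2 = 0 := by omega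
      rw [hb0] at hd
      rw [if_pos (by simp [hb])]
      omega

lemma nat_lor_shift (q : Nat) (ℓ : Nat) : (q * 2 ^ (ℓ + 1)) ||| 2 ^ ℓ = q * 2 ^ (ℓ + 1) + 2 ^ ℓ := by
  have h0 : q * 2 ^ (ℓ + 1) = 2 ^ (ℓ + 1) * q + 0 := by ring
  rw [h0]
  apply Nat.eq_of_testBit_eq
  intro i
  rw [Nat.testBit_lor, Nat.testBit_two_pow_mul_add q (b := 0) (by positivity) i,
    show 2 ^ (ℓ + 1) * q + 0 + 2 ^ ℓ = 2 ^ (ℓ + 1) * q + 2 ^ ℓ from by ring,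
    Nat.testBit_two_pow_mul_add q (b := 2 ^ ℓ) (Nat.pow_lt_pow_right (by norm_num) (by omega)) i]
  by_cases hi : i < ℓ + 1
  · simp [hi, Nat.testBit_two_pow]
  · have hne : ℓ ≠ i := by omega
    simp [hi, Nat.testBit_two_pow, hne]

lemma bor_shift (q : Int) (hq : 0 ≤ q) (ℓ : Nat) :
    PySem.Int.bor (q * 2 ^ (ℓ + 1)) ((1 : Int) <<< ℓ) = q * 2 ^ (ℓ + 1) + 2 ^ ℓ := by
  obtain ⟨n, rfl⟩ := Int.eq_ofNat_of_zero_le hq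
  rw [one_shl, PySem.Int.bor_of_nonneg (by positivity) (by positivity)]
  have c1 : ((n:Int) * 2 ^ (ℓ+1)).toNat = n * 2 ^ (ℓ+1) := by
    rw [show ((n:Int) * 2 ^ (ℓ+1)) = ((n * 2 ^ (ℓ+1) : Nat) : Int) from by push_cast; ring]
    exact Int.toNat_natCast _
  rw [c1, Int.toNat_natCast, nat_lor_shift]
  push_cast; ring

-- the trie invariant: t mirrors the multiset M level by level (cnt = how many values below)
def models : BTrie → Nat → List Int → Prop
  | t, 0, M => tcnt t = (M.length : Int)
  | t, ℓ + 1, M => tcnt t = (M.length : Int) ∧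
      models (tleft t) ℓ (M.filter (fun a => !(ibit ℓ a))) ∧
      models (tright t) ℓ (M.filter (fun a => ibit ℓ a))

lemma models_perm : ∀ (ℓ : Nat) (t : BTrie) {M M' : List Int}, M.Perm M' →
    models t ℓ M → models t ℓ M' := by
  intro ℓ
  induction ℓ with
  | zero => intro t M M' h hm; simpa [models, h.length_eq.symm] using hm
  | succ ℓ ih =>
    intro t M M' h hm
    obtain ⟨hc, hl, hr⟩ := hm
    exact ⟨by rw [hc, h.length_eq], ih _ (h.filter _) hl, ih _ (h.filter _) hr⟩

lemma models_nil : ∀ ℓ, models BTrie.nil ℓ [] := by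
  intro ℓ
  induction ℓ with
  | zero => simp [models, tcnt]
  | succ ℓ ih => exact ⟨by simp [tcnt], by simpa [tleft] using ih, by simpa [tright] using ih⟩

lemma models_insert : ∀ (ℓ : Nat) t (v : Int) M, models t ℓ M →
    models (trieInsert t v ℓ) ℓ (v :: M) := by
  intro ℓ
  induction ℓ with
  | zero =>
    intro t v M hm
    simp only [models, trieInsert, tcnt, List.length_cons] at *
    push_cast
    omega
  | succ ℓ ih =>
    intro t v M hm
    obtain ⟨hc, hl, hr⟩ := hm
    rw [trieInsert, bitOn_eq]
    by_cases hb : ibit ℓ v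
    · rw [if_pos hb]
      refine ⟨?_, ?_, ?_⟩
      · simp only [tcnt, List.length_cons] at hc ⊢; push_cast at hc ⊢; omega
      · simpa [tleft, List.filter_cons, hb] using hl
      · simp only [tright, List.filter_cons, hb]
        simpa using ih (tright t) v _ hr
    · rw [if_neg hb]
      refine ⟨?_, ?_, ?_⟩
      · simp only [tcnt, List.length_cons] at hc ⊢; push_cast at hc ⊢; omega
      · simp only [tleft, List.filter_cons, hb]
        simpa [hb] using ih (tleft t) v _ hl
      · simpa [tright, List.filter_cons, hb] using hr

lemma models_del : ∀ (ℓ : Nat) t (v : Int) M, models t ℓ (v :: M) →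
    models (trieDel t v ℓ) ℓ M := by
  intro ℓ
  induction ℓ with
  | zero =>
    intro t v M hm
    simp only [models, trieDel, tcnt, List.length_cons] at *
    push_cast at *
    omega
  | succ ℓ ih =>
    intro t v M hm
    obtain ⟨hc, hl, hr⟩ := hm
    rw [trieDel, bitOn_eq]
    by_cases hb : ibit ℓ v
    · rw [if_pos hb]
      refine ⟨?_, ?_, ?_⟩
      · simp only [tcnt, List.length_cons] at hc ⊢; push_cast at hc ⊢; omega
      · simpa [tleft, List.filter_cons, hb] using hl
      · simp only [tright]
        apply ih
        simpa [List.filter_cons, hb] using hr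
    · rw [if_neg hb]
      refine ⟨?_, ?_, ?_⟩
      · simp only [tcnt, List.length_cons] at hc ⊢; push_cast at hc ⊢; omega
      · simp only [tleft]
        apply ih
        simpa [List.filter_cons, hb] using hl
      · simpa [tright, List.filter_cons, hb] using hr

lemma models_cnt : ∀ (ℓ : Nat) (t : BTrie) (M : List Int), models t ℓ M →
    tcnt t = (M.length : Int) := by
  intro ℓ t M h
  cases ℓ with
  | zero => exact h
  | succ ℓ => exact h.1

lemma cond_iff {ℓ : Nat} {c : BTrie} {Mc : List Int} (h : models c ℓ Mc) :
    ((!(tIsNil c) && decide (0 < tcnt c)) = true ↔ Mc ≠ []) := by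
  have hc := models_cnt ℓ c Mc h
  constructor
  · intro hcond hnil
    rw [hnil] at hc
    simp at hc hcond
    omega
  · intro hnil
    have hlen : 0 < Mc.length := List.length_pos_iff.mpr hnil
    have hpos : 0 < tcnt c := by rw [hc]; exact_mod_cast hlen
    have hnn : tIsNil c = false := by
      cases c with
      | nil => simp [tcnt] at hpos
      | node a l r => rfl
    simp [hnn, hpos]

lemma getMax_shift : ∀ (ℓ : Nat) t (v q : Int), 0 ≤ q →
    trieGetMax t v ℓ (q * 2 ^ ℓ) = q * 2 ^ ℓ + trieGetMax t v ℓ 0 := by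
  intro ℓ
  induction ℓ with
  | zero => intro t v q hq; simp [trieGetMax]
  | succ ℓ ih =>
    intro t v q hq
    have hp : (2:Int) ^ (ℓ + 1) = 2 * 2 ^ ℓ := by ring
    have hbor : PySem.Int.bor (q * 2 ^ (ℓ + 1)) ((1:Int) <<< ℓ) = (2 * q + 1) * 2 ^ ℓ := by
      rw [bor_shift q hq ℓ]; ring
    have hbor0 : PySem.Int.bor 0 ((1:Int) <<< ℓ) = (2:Int) ^ ℓ := by
      have h := bor_shift 0 le_rfl ℓ
      simpa using h
    simp only [trieGetMax]
    by_cases hb : bitOn v ℓ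
    · simp only [hb, if_true]
      by_cases hcond : (!(tIsNil (tleft t)) && decide (0 < tcnt (tleft t))) = true
      · simp only [hcond, if_true]
        rw [hbor, hbor0, ih _ _ _ (by omega : (0:Int) ≤ 2 * q + 1)]
        have h1 : trieGetMax (tleft t) v ℓ ((2:Int) ^ ℓ) = 2 ^ ℓ + trieGetMax (tleft t) v ℓ 0 := by
          simpa using ih (tleft t) v 1 (by omega)
        rw [h1, hp]; ring
      · rw [if_neg hcond, if_neg hcond]
        have e : q * (2:Int) ^ (ℓ + 1) = (2 * q) * 2 ^ ℓ := by rw [hp]; ring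
        rw [e, ih _ _ _ (by omega : (0:Int) ≤ 2 * q)]
    · rw [if_neg hb, if_neg hb]
      by_cases hcond : (!(tIsNil (tright t)) && decide (0 < tcnt (tright t))) = true
      · simp only [hcond, if_true]
        rw [hbor, hbor0, ih _ _ _ (by omega : (0:Int) ≤ 2 * q + 1)]
        have h1 : trieGetMax (tright t) v ℓ ((2:Int) ^ ℓ) = 2 ^ ℓ + trieGetMax (tright t) v ℓ 0 := by
          simpa using ih (tright t) v 1 (by omega)
        rw [h1, hp]; ring
      · rw [if_neg hcond, if_neg hcond]
        have e : q * (2:Int) ^ (ℓ + 1) = (2 * q) * 2 ^ ℓ := by rw [hp]; ring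
        rw [e, ih _ _ _ (by omega : (0:Int) ≤ 2 * q)]

lemma key_decomp (ℓ : Nat) (v a : Int) :
    PySem.Int.band (PySem.Int.bxor v a) ((2:Int) ^ (ℓ + 1) - 1) =
      (if xor (ibit ℓ v) (ibit ℓ a) then (2:Int) ^ ℓ else 0) +
      PySem.Int.band (PySem.Int.bxor v a) ((2:Int) ^ ℓ - 1) := by
  rw [band_mask, band_mask, emod_decomp, ibit_bxor]

lemma getMax_char : ∀ (ℓ : Nat) t (v : Int) M, models t ℓ M → M ≠ [] →
    (∃ a ∈ M, trieGetMax t v ℓ 0 = PySem.Int.band (PySem.Int.bxor v a) ((2 : Int) ^ ℓ - 1)) ∧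
    ∀ a ∈ M, PySem.Int.band (PySem.Int.bxor v a) ((2 : Int) ^ ℓ - 1) ≤ trieGetMax t v ℓ 0 := by
  intro ℓ
  induction ℓ with
  | zero =>
    intro t v M hm hne
    obtain ⟨a, ha⟩ := List.exists_mem_of_ne_nil M hne
    simp only [trieGetMax, pow_zero, sub_self]
    exact ⟨⟨a, ha, by simp⟩, fun b hb => by simp⟩
  | succ ℓ ih =>
    intro t v M hm hne
    obtain ⟨hc, hl, hr⟩ := hm
    have hbor0 : PySem.Int.bor 0 ((1:Int) <<< ℓ) = (2:Int) ^ ℓ := by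
      simpa using bor_shift 0 le_rfl ℓ
    simp only [trieGetMax, bitOn_eq]
    by_cases hbv : ibit ℓ v = true
    · rw [if_pos hbv]
      by_cases hcond : (!(tIsNil (tleft t)) && decide (0 < tcnt (tleft t))) = true
      · have hMl : M.filter (fun a => !(ibit ℓ a)) ≠ [] := (cond_iff hl).1 hcond
        rw [if_pos hcond, hbor0]
        have hsh : trieGetMax (tleft t) v ℓ ((2:Int) ^ ℓ) = 2 ^ ℓ + trieGetMax (tleft t) v ℓ 0 := by
          simpa using getMax_shift ℓ (tleft t) v 1 (by omega)
        rw [hsh]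
        obtain ⟨⟨a0, ha0, hG⟩, hub⟩ := ih (tleft t) v _ hl hMl
        have hGnn : 0 ≤ trieGetMax (tleft t) v ℓ 0 := by
          rw [hG]; exact (band_mask_bounds _ ℓ).1
        constructor
        · refine ⟨a0, List.mem_of_mem_filter ha0, ?_⟩
          have hb0 : ibit ℓ a0 = false := by simpa using List.of_mem_filter ha0
          rw [key_decomp, hbv, hb0, hG]
          simp
        · intro a haM
          rw [key_decomp, hbv]
          by_cases hba : ibit ℓ a = true
          · rw [hba]
            have h1 := (band_mask_bounds (PySem.Int.bxor v a) ℓ).2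
            rw [show (xor true true) = false from rfl, if_neg (by simp), zero_add]
            linarith
          · have hba' : ibit ℓ a = false := by simpa using hba
            have hmem : a ∈ M.filter (fun a => !(ibit ℓ a)) :=
              List.mem_filter_of_mem haM (by simp [hba'])
            rw [hba']
            have h2 := hub a hmem
            rw [show (xor true false) = true from rfl, if_pos rfl]
            linarith
      · have hMl : M.filter (fun a => !(ibit ℓ a)) = [] := by
          by_contra hne2
          exact hcond ((cond_iff hl).2 hne2)
        rw [if_neg hcond]
        have hMr : M.filter (fun a => ibit ℓ a) ≠ [] := by
          intro h0
          apply hne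
          have hlen := (List.filter_append_perm (fun a => ibit ℓ a) M).length_eq
          rw [List.length_append, h0, hMl] at hlen
          simpa using (List.length_eq_zero_iff.mp (by simpa using hlen.symm))
        obtain ⟨⟨a0, ha0, hG⟩, hub⟩ := ih (tright t) v _ hr hMr
        constructor
        · refine ⟨a0, List.mem_of_mem_filter ha0, ?_⟩
          have hb0 : ibit ℓ a0 = true := List.of_mem_filter ha0
          rw [key_decomp, hbv, hb0, hG]
          simp
        · intro a haM
          rw [key_decomp, hbv]
          by_cases hba : ibit ℓ a = true
          · rw [hba]
            have h2 := hub a (List.mem_filter_of_mem haM hba)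
            rw [show (xor true true) = false from rfl, if_neg (by simp), zero_add]
            exact h2
          · exfalso
            have hba' : ibit ℓ a = false := by simpa using hba
            have hmem : a ∈ M.filter (fun a => !(ibit ℓ a)) :=
              List.mem_filter_of_mem haM (by simp [hba'])
            rw [hMl] at hmem
            simp at hmem
    · have hbv' : ibit ℓ v = false := by simpa using hbv
      rw [if_neg (by simp [hbv'])]
      by_cases hcond : (!(tIsNil (tright t)) && decide (0 < tcnt (tright t))) = true
      · have hMr : M.filter (fun a => ibit ℓ a) ≠ [] := (cond_iff hr).1 hcond
        rw [if_pos hcond, hbor0]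
        have hsh : trieGetMax (tright t) v ℓ ((2:Int) ^ ℓ) = 2 ^ ℓ + trieGetMax (tright t) v ℓ 0 := by
          simpa using getMax_shift ℓ (tright t) v 1 (by omega)
        rw [hsh]
        obtain ⟨⟨a0, ha0, hG⟩, hub⟩ := ih (tright t) v _ hr hMr
        have hGnn : 0 ≤ trieGetMax (tright t) v ℓ 0 := by
          rw [hG]; exact (band_mask_bounds _ ℓ).1
        constructor
        · refine ⟨a0, List.mem_of_mem_filter ha0, ?_⟩
          have hb0 : ibit ℓ a0 = true := List.of_mem_filter ha0
          rw [key_decomp, hbv', hb0, hG]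
          simp
        · intro a haM
          rw [key_decomp, hbv']
          by_cases hba : ibit ℓ a = true
          · rw [hba]
            have h2 := hub a (List.mem_filter_of_mem haM hba)
            rw [show (xor false true) = true from rfl, if_pos rfl]
            linarith
          · have hba' : ibit ℓ a = false := by simpa using hba
            rw [hba']
            have h1 := (band_mask_bounds (PySem.Int.bxor v a) ℓ).2
            rw [show (xor false false) = false from rfl, if_neg (by simp), zero_add]
            linarith
      · have hMr : M.filter (fun a => ibit ℓ a) = [] := by
          by_contra hne2
          exact hcond ((cond_iff hr).2 hne2)
        rw [if_neg hcond]
        have hMl : M.filter (fun a => !(ibit ℓ a)) ≠ [] := by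
          intro h0
          apply hne
          have hlen := (List.filter_append_perm (fun a => ibit ℓ a) M).length_eq
          rw [List.length_append, h0, hMr] at hlen
          simpa using (List.length_eq_zero_iff.mp (by simpa using hlen.symm))
        obtain ⟨⟨a0, ha0, hG⟩, hub⟩ := ih (tleft t) v _ hl hMl
        constructor
        · refine ⟨a0, List.mem_of_mem_filter ha0, ?_⟩
          have hb0 : ibit ℓ a0 = false := by simpa using List.of_mem_filter ha0
          rw [key_decomp, hbv', hb0, hG]
          simp
        · intro a haM
          rw [key_decomp, hbv']
          by_cases hba : ibit ℓ a = true
          · exfalso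
            have hmem : a ∈ M.filter (fun a => ibit ℓ a) :=
              List.mem_filter_of_mem haM hba
            rw [hMr] at hmem
            simp at hmem
          · have hba' : ibit ℓ a = false := by simpa using hba
            rw [hba']
            have h2 := hub a (List.mem_filter_of_mem haM (by simp [hba']))
            rw [show (xor false false) = false from rfl, if_neg (by simp), zero_add]
            exact h2

lemma maxD_of_char {xs : List Int} {r : Int} (hne : xs ≠ [])
    (hmem : ∃ a ∈ xs, r = a) (hub : ∀ a ∈ xs, a ≤ r) :
    (PySem.List.max? xs (fun y => y)).getD 0 = r := by
  cases xs with
  | nil => exact absurd rfl hne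
  | cons x t =>
    rw [PySem.List.max?_id_cons, Option.getD_some]
    obtain ⟨hx, hmax⟩ := PySem.List.le_foldl_max t x
    obtain ⟨a, ha, rfl⟩ := hmem
    have hmm : t.foldl max x ∈ x :: t := by
      rcases PySem.List.foldl_max_mem t x with h | h
      · rw [h]; exact List.mem_cons_self
      · exact List.mem_cons_of_mem _ h
    refine le_antisymm (hub _ hmm) ?_
    rcases List.mem_cons.mp ha with rfl | h
    · exact hx
    · exact hmax _ h

lemma maskB_eq : maskB = (2 : Int) ^ 18 - 1 := by decide

lemma getMax_eq_linear (t : BTrie) (v : Int) (M : List Int) (h : models t 18 M) (hne : M ≠ []) :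
    trieGetMax t v 18 0 =
      (PySem.List.max? (M.map (fun x => PySem.Int.band (PySem.Int.bxor v x) maskB))
        (fun y => y)).getD 0 := by
  obtain ⟨⟨a0, ha0, hval⟩, hub⟩ := getMax_char 18 t v M h hne
  rw [maskB_eq]
  refine (maxD_of_char ?_ ?_ ?_).symm
  · simpa using hne
  · exact ⟨_, List.mem_map_of_mem ha0, hval⟩
  · intro b hb
    obtain ⟨a, ha, rfl⟩ := List.mem_map.mp hb
    exact hub a ha

lemma dfs_sim (E : PySem.Dict Int (List Int)) (S : PySem.Dict Int (List (Int × Int))) :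
    ∀ (f : Nat) (nd : Int) (t : BTrie) (path ans : List Int), models t 18 path →
      (dfsA E S f nd (t, ans)).2 = (dfsB E S f nd (path, ans)).2 ∧
      (dfsB E S f nd (path, ans)).1 = path ∧
      models (dfsA E S f nd (t, ans)).1 18 path := by
  intro f
  induction f with
  | zero => intro nd t path ans hm; exact ⟨rfl, rfl, hm⟩
  | succ f ih =>
    intro nd t path ans hm
    have hm1 : models (trieInsert t nd 18) 18 (path ++ [nd]) :=
      models_perm 18 _ (List.perm_append_singleton nd path).symm (models_insert 18 t nd path hm)
    -- the two query loops write the same values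
    have hansfun :
        (fun (a : List Int) (q : Int × Int) =>
            a.set q.1.toNat (trieGetMax (trieInsert t nd 18) q.2 18 0)) =
        (fun (a : List Int) (q : Int × Int) =>
          a.set q.1.toNat
            ((PySem.List.max? ((path ++ [nd]).map
                (fun x => PySem.Int.band (PySem.Int.bxor q.2 x) maskB)) (fun y => y)).getD 0)) := by
      funext a q
      rw [getMax_eq_linear _ q.2 (path ++ [nd]) hm1 (by simp)]
    -- the two child loops stay in sync
    have hfold : ∀ (cs : List Int) (t : BTrie) (path ans : List Int), models t 18 path →
        (cs.foldl (fun st c => dfsA E S f c st) (t, ans)).2 =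
          (cs.foldl (fun st c => dfsB E S f c st) (path, ans)).2 ∧
        (cs.foldl (fun st c => dfsB E S f c st) (path, ans)).1 = path ∧
        models (cs.foldl (fun st c => dfsA E S f c st) (t, ans)).1 18 path := by
      intro cs
      induction cs with
      | nil => intro t path ans hm; exact ⟨rfl, rfl, hm⟩
      | cons c cs ihc =>
        intro t path ans hm
        obtain ⟨e1, e2, m1⟩ := ih c t path ans hm
        simp only [List.foldl_cons]
        have hB : dfsB E S f c (path, ans) = (path, (dfsA E S f c (t, ans)).2) := by
          apply Prod.ext
          · exact e2
          · exact e1.symm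
        rw [hB]
        have := ihc (dfsA E S f c (t, ans)).1 path (dfsA E S f c (t, ans)).2 m1
        simpa using this
    obtain ⟨E1, E2, M1⟩ :=
      hfold ((E.getD nd []))
        (trieInsert t nd 18) (path ++ [nd])
        ((S.getD nd []).foldl
          (fun a q => a.set q.1.toNat (trieGetMax (trieInsert t nd 18) q.2 18 0)) ans) hm1
    refine ⟨?_, ?_, ?_⟩
    · simp only [dfsA, dfsB]
      rw [← hansfun]
      exact E1
    · simp only [dfsB]
      rw [← hansfun, E2, List.dropLast_concat]
    · simp only [dfsA]
      exact models_del 18 _ nd path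
        (models_perm 18 _ (List.perm_append_singleton nd path) M1)

lemma stored_eq (queries : List (List Int)) (h : ∀ q ∈ queries, q.length = 2) :
    ((PySem.List.enumerate queries 0).foldl qStoreA PySem.Dict.empty) =
    ((PySem.List.enumerate queries 0).foldl qStoreB PySem.Dict.empty) := by
  apply PySem.List.foldl_congr_mem
  intro acc x hx
  obtain ⟨k, hk, rfl⟩ := (PySem.List.mem_enumerate_iff queries 0 x).mp hx
  obtain ⟨a, b, hab⟩ := List.length_eq_two.mp (h queries[k] (List.getElem_mem hk))
  simp [qStoreA, qStoreB, hab]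

lemma models_init : models (BTrie.node 0 BTrie.nil BTrie.nil) 18 [] :=
  ⟨rfl, by simpa [tleft] using models_nil 17, by simpa [tright] using models_nil 17⟩

theorem maxGeneticDifference_spec : Claim_equal_maxGeneticDifference := by
  intro parents queries _ hpre
  show maxGeneticDifference parents queries = maxGeneticDifference_alt parents queries
  unfold maxGeneticDifference maxGeneticDifference_alt
  rw [stored_eq queries hpre.2]
  exact (dfs_sim _ _ (parents.length + 1) _ _ [] _ models_init).1
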